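-- pv_equiv track=rewrite | github.com/Philex5/ShuaTi | MathProblem/numPrimeArrangement.py | countNotPrime
-- ===== SOURCE A (Python) =====
-- def countNotPrime(n):
--     """
--     统计不是质数的个数
--     :param n:
--     :return:
--     """
--     if n <= 1:
--         return 0
--     # 1不是质数
--     c = 1
--     for i in range(2, n+1):
--         for j in range(2, i//2+1):
--             if i % j == 0 and i != j:
--                 c += 1
--                 break
--     return c
-- ===== SOURCE B (Python) =====
-- def countNotPrime(n):
--     """Count non-primes in [1, n] via a Sieve of Eratosthenes: n minus the number of primes."""
--     if n <= 1:
--         return 0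
--     sieve = [True] * (n + 1)
--     sieve[0] = False
--     sieve[1] = False
--     p = 2
--     while p * p <= n:
--         if sieve[p]:
--             for m in range(p * p, n + 1, p):
--                 sieve[m] = False
--         p += 1
--     return n - sum(sieve)
-- ===== Notes on version B (the rewrite author's own statement) =====
-- stated objective: faster
-- what changed: Replaced A's per-number trial division (inner loop over all candidate divisors up to i//2 for every i) by a Sieve of Eratosthenes over a boolean array, returning n minus the number of primes.
import Mathlib
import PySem

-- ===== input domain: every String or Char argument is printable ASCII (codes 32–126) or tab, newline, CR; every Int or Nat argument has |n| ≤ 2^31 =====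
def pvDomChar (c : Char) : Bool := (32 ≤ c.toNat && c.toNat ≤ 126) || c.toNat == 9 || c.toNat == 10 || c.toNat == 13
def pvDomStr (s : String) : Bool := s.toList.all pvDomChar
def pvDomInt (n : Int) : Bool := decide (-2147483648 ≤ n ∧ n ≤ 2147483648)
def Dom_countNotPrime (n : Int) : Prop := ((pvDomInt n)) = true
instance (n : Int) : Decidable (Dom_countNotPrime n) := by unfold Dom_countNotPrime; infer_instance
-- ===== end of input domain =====

-- B replaces A's per-number trial division by a Sieve of Eratosthenes and returns n minus the
-- number of primes; objective: faster.

-- ===== PORT A =====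
-- A's inner 'for j in range(2, i//2+1): … break' loop: true iff some j triggers the count
def cnpInner (i : Int) (js : List Int) : Bool :=
  match js with
  | [] => false
  | j :: rest => if PySem.Int.mod i j == 0 && i != j then true else cnpInner i rest

def countNotPrime (n : Int) : Int :=
  if n ≤ 1 then 0
  else
    (PySem.List.pyRange 2 (n + 1) 1).foldl
      (fun c i =>
        if cnpInner i (PySem.List.pyRange 2 (PySem.Int.floordiv i 2 + 1) 1) then c + 1 else c)
      1

-- ===== PORT B =====
-- Python: 'for m in range(p*p, n+1, p): sieve[m] = False'; under the loop guard p*p <= n that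
-- range has exactly (n - p*p)/p + 1 elements.  All values on this branch of B are nonnegative,
-- so the sieve indices are ported over Nat (exact for the admitted inputs).
def cnpMark (s : List Bool) (ms : List Nat) : List Bool :=
  ms.foldl (fun s j => s.set j false) s

-- Python: 'while p * p <= n: if sieve[p]: …mark multiples…; p += 1'
def cnpLoop (m : Nat) (s : List Bool) (p : Nat) : List Bool :=
  if h : p * p ≤ m then
    cnpLoop m
      (if s.getD p false then cnpMark s (List.range' (p * p) ((m - p * p) / p + 1) p) else s)
      (p + 1)
  else s
termination_by m + 1 - p
decreasing_by
  have hp : p ≤ m := by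
    rcases Nat.eq_zero_or_pos p with h0 | h0
    · omega
    · calc p = p * 1 := (Nat.mul_one p).symm
        _ ≤ p * p := Nat.mul_le_mul_left p h0
        _ ≤ m := h
  omega

def countNotPrime_alt (n : Int) : Int :=
  if n ≤ 1 then 0
  else
    let m := n.toNat
    let s := cnpLoop m (((List.replicate (m + 1) true).set 0 false).set 1 false) 2
    n - (s.count true : Int)

-- ===== PRECONDITION & SPEC =====
def Spec_countNotPrime (n : Int) (out : Int) : Prop := out = countNotPrime_alt n
instance (n : Int) (out : Int) : Decidable (Spec_countNotPrime n out) := by unfold Spec_countNotPrime; infer_instance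

-- ===== CLAIM (what is proved, stated in full; the proofs are below) =====
def Claim_equal_countNotPrime : Prop := ∀ (n : Int), Dom_countNotPrime n → Spec_countNotPrime n (countNotPrime n)

-- ===== LEMMAS AND PROOFS =====

-- ---- A side ----

theorem cnpInner_iff (i : Int) (js : List Int) :
    cnpInner i js = true ↔ ∃ j ∈ js, PySem.Int.mod i j = 0 ∧ i ≠ j := by
  induction js with
  | nil => simp [cnpInner]
  | cons j rest ih =>
    simp only [cnpInner, List.mem_cons]
    split_ifs with h
    · simp only [Bool.and_eq_true, beq_iff_eq, bne_iff_ne] at h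
      exact iff_of_true rfl ⟨j, Or.inl rfl, h.1, h.2⟩
    · simp only [Bool.and_eq_true, beq_iff_eq, bne_iff_ne, not_and_or, not_not] at h
      rw [ih]
      constructor
      · rintro ⟨j', hj', hc⟩; exact ⟨j', Or.inr hj', hc⟩
      · rintro ⟨j', hj' | hj', hc⟩
        · subst hj'
          rcases h with h | h
          · exact absurd hc.1 h
          · exact absurd hc.2 (by simpa using h)
        · exact ⟨j', hj', hc⟩

theorem inner_iff_not_prime (k : Nat) (hk : 2 ≤ k) :
    (cnpInner (k : Int) (PySem.List.pyRange 2 (PySem.Int.floordiv (k : Int) 2 + 1) 1) = true)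
      ↔ ¬ Nat.Prime k := by
  rw [cnpInner_iff]
  have hfd : PySem.Int.floordiv (k : Int) 2 = ((k / 2 : Nat) : Int) := by
    exact_mod_cast PySem.Int.floordiv_natCast k 2
  rw [hfd]
  constructor
  · rintro ⟨j, hj, hmod, hne⟩
    rw [PySem.List.mem_pyRange_one] at hj
    obtain ⟨hj2, hjlt⟩ := hj
    have hjd : ((j.toNat : Int)) = j := Int.toNat_of_nonneg (by omega)
    have hdvd : j.toNat ∣ k := by
      have hd : j ∣ (k : Int) := (PySem.Int.mod_eq_zero_iff_dvd _ _).1 hmod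
      rw [← hjd] at hd
      exact_mod_cast hd
    have hdk : j.toNat < k := by
      have : k / 2 < k := Nat.div_lt_self (by omega) (by omega)
      omega
    intro hp
    rcases hp.eq_one_or_self_of_dvd j.toNat hdvd with h | h <;> omega
  · intro hnp
    have h1 : k.minFac ∣ k := Nat.minFac_dvd k
    have hp := Nat.minFac_prime (show k ≠ 1 by omega)
    have h2 : 2 ≤ k.minFac := hp.two_le
    have hlt : k.minFac < k := (Nat.not_prime_iff_minFac_lt hk).1 hnp
    have hle : k.minFac ≤ k / 2 := by
      obtain ⟨c, hc⟩ := h1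
      have hc2 : 2 ≤ c := by
        by_contra hcon
        push Not at hcon
        interval_cases c
        · simp at hc; omega
        · simp at hc; omega
      rw [Nat.le_div_iff_mul_le (by omega)]
      calc k.minFac * 2 ≤ k.minFac * c := Nat.mul_le_mul_left _ hc2
        _ = k := hc.symm
    refine ⟨(k.minFac : Int), ?_, ?_, ?_⟩
    · rw [PySem.List.mem_pyRange_one]
      constructor <;> omega
    · rw [PySem.Int.mod_eq_zero_iff_dvd]
      exact_mod_cast h1
    · intro he
      have : k = k.minFac := by exact_mod_cast he
      omega

-- generic counting fold
theorem foldl_count {α : Type} (P : α → Bool) (l : List α) (c : Int) :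
    l.foldl (fun c i => if P i then c + 1 else c) c = c + (l.countP P : Int) := by
  induction l generalizing c with
  | nil => simp
  | cons a t ih =>
    simp only [List.foldl_cons, List.countP_cons, ih]
    split_ifs with h
    · push_cast; ring
    · simp

theorem countNotPrime_closed (n : Int) (h : 2 ≤ n) :
    countNotPrime n =
      1 + ((List.range (n.toNat - 1)).countP (fun k => !decide (Nat.Prime (2 + k))) : Int) := by
  unfold countNotPrime
  rw [if_neg (by omega), PySem.List.pyRange_one, List.foldl_map,
    foldl_count (fun k : Nat =>
      cnpInner ((2 : Int) + k)
        (PySem.List.pyRange 2 (PySem.Int.floordiv ((2 : Int) + k) 2 + 1) 1)) _ 1]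
  have hlen : (n + 1 - 2).toNat = n.toNat - 1 := by omega
  rw [hlen]
  congr 2
  apply List.countP_congr
  intro x _
  have h2x : ((2 : Int) + x) = ((2 + x : Nat) : Int) := by push_cast; ring
  rw [h2x, inner_iff_not_prime (2 + x) (by omega)]
  simp

-- ---- B side: sieve correctness ----

def Marked (q i : Nat) : Prop :=
  i ≤ 1 ∨ ∃ p, Nat.Prime p ∧ p < q ∧ p ∣ i ∧ p * p ≤ i

def SieveInv (m q : Nat) (s : List Bool) : Prop :=
  s.length = m + 1 ∧ ∀ i, i ≤ m → (s.getD i false = false ↔ Marked q i)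

theorem getD_set (s : List Bool) (j i : Nat) (b d : Bool) (hj : j < s.length) :
    (s.set j b).getD i d = if i = j then b else s.getD i d := by
  rw [List.getD_eq_getElem?_getD, List.getD_eq_getElem?_getD, List.getElem?_set]
  by_cases hij : i = j
  · subst hij; simp [hj]
  · simp [hij, Ne.symm hij]

theorem cnpMark_spec (L : List Nat) : ∀ (s : List Bool), (∀ j ∈ L, j < s.length) →
    (cnpMark s L).length = s.length ∧
      ∀ i, (cnpMark s L).getD i false = if i ∈ L then false else s.getD i false := by
  induction L with
  | nil => intro s _; simp [cnpMark]
  | cons j t ih =>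
    intro s hL
    have hj : j < s.length := hL j (by simp)
    have ht : ∀ x ∈ t, x < (s.set j false).length := by
      intro x hx; simpa using hL x (by simp [hx])
    obtain ⟨hlen, hget⟩ := ih (s.set j false) ht
    refine ⟨by simpa using hlen, ?_⟩
    intro i
    rw [show cnpMark s (j :: t) = cnpMark (s.set j false) t from rfl, hget i,
      getD_set s j i false false hj]
    by_cases hij : i = j <;> by_cases hit : i ∈ t <;> simp [hij, hit]

theorem mem_mult_range (m q x : Nat) (hq : 2 ≤ q) (hqm : q * q ≤ m) :
    x ∈ List.range' (q * q) ((m - q * q) / q + 1) q ↔ q ∣ x ∧ q * q ≤ x ∧ x ≤ m := by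
  rw [List.mem_range']
  constructor
  · rintro ⟨t, ht, rfl⟩
    have htq : t * q ≤ m - q * q := (Nat.le_div_iff_mul_le (by omega)).1 (by omega)
    have h2 : q * t = t * q := Nat.mul_comm q t
    exact ⟨⟨q + t, by ring⟩, by omega, by omega⟩
  · rintro ⟨⟨c, rfl⟩, hge, hle⟩
    have hcq : q ≤ c := Nat.le_of_mul_le_mul_left hge (by omega)
    have h3 : q * c = q * q + q * (c - q) := by rw [← Nat.mul_add]; congr 1; omega
    have h4 : (c - q) * q ≤ m - q * q := by rw [Nat.mul_comm]; omega
    exact ⟨c - q, by have := (Nat.le_div_iff_mul_le (k := q) (by omega)).2 h4; omega, by omega⟩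

theorem marked_self_iff (q : Nat) (hq : 2 ≤ q) : Marked q q ↔ ¬ Nat.Prime q := by
  constructor
  · rintro (h | ⟨p, hp, hlt, hdvd, _⟩)
    · omega
    · intro hqp
      rcases (Nat.Prime.eq_one_or_self_of_dvd hqp p hdvd) with h | h
      · exact absurd h hp.one_lt.ne'
      · omega
  · intro hnp
    right
    refine ⟨q.minFac, Nat.minFac_prime (by omega), ?_, Nat.minFac_dvd q, ?_⟩
    · exact (Nat.not_prime_iff_minFac_lt hq).1 hnp
    · have h2 := Nat.minFac_sq_le_self (show 0 < q by omega) hnp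
      rw [pow_two] at h2
      exact h2

theorem marked_succ (q i : Nat) :
    Marked (q + 1) i ↔ Marked q i ∨ (Nat.Prime q ∧ q ∣ i ∧ q * q ≤ i) := by
  unfold Marked
  constructor
  · rintro (h | ⟨p, hp, hlt, hd, hs⟩)
    · exact Or.inl (Or.inl h)
    · rcases Nat.lt_succ_iff_lt_or_eq.1 hlt with h | h
      · exact Or.inl (Or.inr ⟨p, hp, h, hd, hs⟩)
      · subst h; exact Or.inr ⟨hp, hd, hs⟩
  · rintro ((h | ⟨p, hp, hlt, hd, hs⟩) | ⟨hp, hd, hs⟩)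
    · exact Or.inl h
    · exact Or.inr ⟨p, hp, by omega, hd, hs⟩
    · exact Or.inr ⟨q, hp, by omega, hd, hs⟩

theorem sieve_step (m p : Nat) (s : List Bool) (hp : 2 ≤ p) (h : p * p ≤ m)
    (hInv : SieveInv m p s) :
    SieveInv m (p + 1)
      (if s.getD p false then cnpMark s (List.range' (p * p) ((m - p * p) / p + 1) p) else s) := by
  obtain ⟨hlen, hinv⟩ := hInv
  have hpm : p ≤ m := by nlinarith
  by_cases hsp : s.getD p false = true
  · rw [if_pos hsp]
    have hpp : Nat.Prime p := by
      by_contra hnp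
      have hfalse := (hinv p hpm).2 ((marked_self_iff p hp).2 hnp)
      rw [hsp] at hfalse
      exact absurd hfalse (by simp)
    have hLlt : ∀ j ∈ List.range' (p * p) ((m - p * p) / p + 1) p, j < s.length := by
      intro j hj
      rw [mem_mult_range m p j hp h] at hj
      omega
    obtain ⟨hlen', hget⟩ := cnpMark_spec _ s hLlt
    refine ⟨by omega, ?_⟩
    intro i him
    rw [hget i, marked_succ]
    by_cases hiL : i ∈ List.range' (p * p) ((m - p * p) / p + 1) p
    · rw [if_pos hiL]
      rw [mem_mult_range m p i hp h] at hiL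
      exact iff_of_true rfl (Or.inr ⟨hpp, hiL.1, hiL.2.1⟩)
    · rw [if_neg hiL, hinv i him]
      constructor
      · exact Or.inl
      · rintro (hM | ⟨_, hd, hs2⟩)
        · exact hM
        · exact absurd ((mem_mult_range m p i hp h).2 ⟨hd, hs2, him⟩) hiL
  · rw [if_neg hsp]
    have hnp : ¬ Nat.Prime p := by
      rw [← marked_self_iff p hp, ← hinv p hpm]
      exact Bool.not_eq_true _ ▸ (by simpa using hsp)
    refine ⟨hlen, ?_⟩
    intro i him
    rw [hinv i him, marked_succ]
    constructor
    · exact Or.inl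
    · rintro (hM | ⟨hpp, _, _⟩)
      · exact hM
      · exact absurd hpp hnp

theorem cnpLoop_final (m : Nat) (s : List Bool) (q : Nat) (hq : 2 ≤ q)
    (hInv : SieveInv m q s) :
    ∃ q', 2 ≤ q' ∧ m < q' * q' ∧ SieveInv m q' (cnpLoop m s q) := by
  by_cases h : q * q ≤ m
  · rw [cnpLoop, dif_pos h]
    exact cnpLoop_final m _ (q + 1) (by omega) (sieve_step m q s hq h hInv)
  · rw [cnpLoop, dif_neg h]
    exact ⟨q, hq, by omega, hInv⟩
termination_by m + 1 - q
decreasing_by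
  have hp : q ≤ m := by nlinarith
  omega

theorem marked_final (q i : Nat) (hi : 2 ≤ i) (hq : i < q * q) :
    Marked q i ↔ ¬ Nat.Prime i := by
  constructor
  · rintro (h | ⟨p, hp, _, hd, hs⟩)
    · omega
    · intro hip
      rcases Nat.Prime.eq_one_or_self_of_dvd hip p hd with h | h
      · exact absurd h hp.one_lt.ne'
      · subst h; nlinarith
  · intro hnp
    have hsq := Nat.minFac_sq_le_self (show 0 < i by omega) hnp
    rw [pow_two] at hsq
    right
    refine ⟨i.minFac, Nat.minFac_prime (by omega), ?_, Nat.minFac_dvd i, hsq⟩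
    by_contra hc
    push Not at hc
    have : q * q ≤ i.minFac * i.minFac := Nat.mul_le_mul hc hc
    omega

theorem count_eq_countP_range (s : List Bool) :
    s.count true = (List.range s.length).countP (fun i => s.getD i false) := by
  induction s with
  | nil => simp
  | cons b t ih =>
    rw [List.count_cons, List.length_cons, List.range_succ_eq_map, List.countP_cons,
      List.countP_map]
    simp only [List.getD_cons_zero, List.getD_cons_succ, Function.comp_def, Nat.succ_eq_add_one]
    rw [ih]
    rcases b <;> simp

-- ---- assembly ----

theorem main_eq (n : Int) (h : 2 ≤ n) : countNotPrime n = countNotPrime_alt n := by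
  have hm2 : 2 ≤ n.toNat := by omega
  set m := n.toNat with hm
  set s0 : List Bool := ((List.replicate (m + 1) true).set 0 false).set 1 false with hs0
  -- initial invariant
  have hInv0 : SieveInv m 2 s0 := by
    refine ⟨by simp [hs0], ?_⟩
    intro i him
    have hget : s0.getD i false = if i = 1 then false else if i = 0 then false else true := by
      rw [hs0, getD_set _ 1 i false false
          (by simp only [List.length_set, List.length_replicate]; omega),
        getD_set _ 0 i false false
          (by simp only [List.length_replicate]; omega)]
      split_ifs with h1 h0
      · rfl
      · rfl
      · exact List.getD_replicate true (by omega)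
    rw [hget]
    by_cases h1 : i ≤ 1
    · have : Marked 2 i := Or.inl h1
      interval_cases i <;> simpa using this
    · rw [if_neg (by omega), if_neg (by omega)]
      constructor
      · intro hc; exact absurd hc (by simp)
      · rintro (hc | ⟨p, hp, hlt, _, _⟩)
        · omega
        · have := hp.two_le; omega
  obtain ⟨q', hq2, hqm, hlenF, hgetF⟩ := cnpLoop_final m s0 2 (by omega) hInv0
  have hfinal : ∀ i, i ≤ m → (cnpLoop m s0 2).getD i false = decide (Nat.Prime i) := by
    intro i him
    rcases Nat.lt_or_ge i 2 with h2 | h2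
    · have hMi : Marked q' i := Or.inl (by omega)
      rw [(hgetF i him).2 hMi]
      interval_cases i <;> simp [Nat.not_prime_zero, Nat.not_prime_one]
    · have hiff := hgetF i him
      rw [marked_final q' i h2 (by omega)] at hiff
      by_cases hpi : Nat.Prime i
      · cases hb : (cnpLoop m s0 2).getD i false
        · exact absurd (hiff.1 hb) (by simpa using hpi)
        · simp [hpi]
      · rw [hiff.2 hpi]
        simp [hpi]
  -- the count of True entries is the number of primes ≤ m
  have hcount : (cnpLoop m s0 2).count true
      = (List.range (m + 1)).countP (fun i => decide (Nat.Prime i)) := by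
    rw [count_eq_countP_range, hlenF]
    apply List.countP_congr
    intro x hx
    rw [List.mem_range] at hx
    rw [hfinal x (by omega)]
  -- number of primes ≤ m = number of primes among 2..m
  have hpi : (List.range (m + 1)).countP (fun i => decide (Nat.Prime i))
      = (List.range (m - 1)).countP (fun k => decide (Nat.Prime (2 + k))) := by
    have hsplit : List.range (m + 1) = List.range' 0 2 ++ List.range' 2 (m - 1) := by
      rw [List.range_eq_range']
      have := List.range'_append (s := 0) (m := 2) (n := m - 1) (step := 1)
      rw [show (0 + 1 * 2 : Nat) = 2 by omega] at this
      rw [this]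
      congr 1
      omega
    rw [hsplit, List.countP_append,
      show List.range' 0 2 = [0, 1] from rfl, List.range'_eq_map_range, List.countP_map]
    simp [Nat.not_prime_zero, Nat.not_prime_one, Function.comp_def]
  -- prime and non-prime counts over 2..m add up
  have hsum : (List.range (m - 1)).countP (fun k => decide (Nat.Prime (2 + k)))
      + (List.range (m - 1)).countP (fun k => !decide (Nat.Prime (2 + k))) = m - 1 := by
    have hlen := List.length_eq_countP_add_countP
      (fun k => decide (Nat.Prime (2 + k))) (l := List.range (m - 1))
    have halign : (List.range (m - 1)).countP
        (fun a => decide ¬((fun k => decide (Nat.Prime (2 + k))) a = true))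
        = (List.range (m - 1)).countP (fun k => !decide (Nat.Prime (2 + k))) :=
      List.countP_congr (by intro x _; simp)
    rw [halign] at hlen
    simp only [List.length_range] at hlen
    omega
  rw [countNotPrime_closed n h]
  show _ = if n ≤ 1 then (0 : Int) else _
  rw [if_neg (by omega)]
  show (1 : Int) + _ = n - ((cnpLoop m s0 2).count true : Int)
  rw [hcount, hpi]
  have hn : n = (m : Int) := by omega
  rw [hn]
  simp only [Int.toNat_natCast]
  omega

-- ===== VERDICT (by name: the statement is the Claim_ definition above) =====
theorem countNotPrime_spec : Claim_equal_countNotPrime := by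
  intro n _
  unfold Spec_countNotPrime
  by_cases h : n ≤ 1
  · unfold countNotPrime countNotPrime_alt
    simp [h]
  · exact main_eq n (by omega)
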